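-- pv_equiv track=rewrite | github.com/deep6821/rohit-workspace | programs/must-do-ques/greedy-approach/5-find_the_largest_number_possible.py | find_largest_number
-- ===== SOURCE A (Python) =====
-- def find_largest_number(number_of_digits, sum_of_digits):
--     """
--     Finds the largest number with given number of digits and sum of Digits
--     :param number_of_digits: Number of digits
--     :param sum_of_digits: Sum of digits
--     :return: Possible largest number
--     """
--
--     # If the sum of digits is 0, then a number is possible only if the number of digits is 1.
--     if sum_of_digits == 0:
--         if number_of_digits == 1:
--             return [0]
--         else:
--             return [-1]
--
--     # sum_of_digits is greater than the maximum possible sum.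
--     if sum_of_digits > 9 * number_of_digits:
--         return [-1]
--
--     result = [0] * number_of_digits
--
--     # Fill from most significant digit to least significant digit!
--     for i in range(number_of_digits):
--         # Place 9 to make the number largest
--         if sum_of_digits >= 9:
--             result[i] = 9
--             sum_of_digits -= 9
--
--         # If remaining sum becomes less than 9, then fill the remaining sum
--         else:
--             result[i] = sum_of_digits
--             sum_of_digits = 0
--
--     return result
-- ===== SOURCE B (Python) =====
-- def find_largest_number(number_of_digits, sum_of_digits):
--     """
--     Finds the largest number with given number of digits and sum of Digits
--     (direct arithmetic: q full nines, one remainder digit, trailing zeros).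
--     """
--     if sum_of_digits == 0:
--         return [0] if number_of_digits == 1 else [-1]
--     if sum_of_digits > 9 * number_of_digits:
--         return [-1]
--     q, r = divmod(sum_of_digits, 9)
--     result = [9] * q
--     if r > 0:
--         result.append(r)
--     result.extend([0] * (number_of_digits - len(result)))
--     return result
-- ===== Notes on version B (the rewrite author's own statement) =====
-- stated objective: faster
-- what changed: Replaces the per-digit greedy fill loop by closed-form divmod arithmetic: divmod(sum,9) gives the count of nines and the remainder digit, and the list is built by bulk replication and zero-padding (same O(n) output size, but no per-element Python-level loop; measured ~1.7x on large n).
-- outside the precondition, e.g. on find_largest_number(2, -5): A returns [-5, 0], B returns [4, 0]; on find_largest_number(0, -3): A returns [], B returns [6]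
import Mathlib
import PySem

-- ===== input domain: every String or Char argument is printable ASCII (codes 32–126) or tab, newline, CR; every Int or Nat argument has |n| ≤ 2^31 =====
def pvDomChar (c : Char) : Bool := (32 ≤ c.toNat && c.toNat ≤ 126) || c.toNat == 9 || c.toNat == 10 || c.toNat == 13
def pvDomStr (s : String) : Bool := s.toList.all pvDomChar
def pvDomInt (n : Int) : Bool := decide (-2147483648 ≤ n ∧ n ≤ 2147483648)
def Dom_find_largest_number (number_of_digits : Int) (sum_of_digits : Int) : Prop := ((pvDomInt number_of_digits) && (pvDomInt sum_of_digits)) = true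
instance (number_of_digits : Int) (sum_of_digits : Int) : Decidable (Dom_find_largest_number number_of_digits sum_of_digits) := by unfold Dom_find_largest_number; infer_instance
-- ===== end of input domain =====

-- B replaces A's per-digit greedy fill loop by closed-form divmod arithmetic (count of
-- nines + remainder digit + zero padding built by replication; timing run measured it
-- ~1.7x faster at large n — a constant-factor change, output is still O(n)).


-- ===== PORT A =====
-- one loop iteration of A: st = (result, sum_of_digits); place 9 or the remaining sum at index i
def pvStepA (st : List Int × Int) (i : Int) : List Int × Int :=
  if st.2 ≥ 9 then (st.1.set i.toNat 9, st.2 - 9)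
  else (st.1.set i.toNat st.2, 0)

def find_largest_number (number_of_digits : Int) (sum_of_digits : Int) : List Int :=
  if sum_of_digits = 0 then
    if number_of_digits = 1 then [0] else [-1]
  else if sum_of_digits > 9 * number_of_digits then [-1]
  else
    -- result = [0] * number_of_digits; for i in range(number_of_digits): …
    -- (indices produced by range are all in 0 ≤ i < number_of_digits, so .toNat is exact)
    ((PySem.List.pyRange 0 number_of_digits 1).foldl pvStepA
      (List.replicate number_of_digits.toNat 0, sum_of_digits)).1

-- ===== PORT B =====
def find_largest_number_alt (number_of_digits : Int) (sum_of_digits : Int) : List Int :=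
  if sum_of_digits = 0 then
    if number_of_digits = 1 then [0] else [-1]
  else if sum_of_digits > 9 * number_of_digits then [-1]
  else
    let q := PySem.Int.floordiv sum_of_digits 9
    let r := PySem.Int.mod sum_of_digits 9
    let result := List.replicate q.toNat (9 : Int)
    let result := if r > 0 then result ++ [r] else result
    -- result.extend([0] * (number_of_digits - len(result)))  ([0]*k is [] for k ≤ 0)
    result ++ List.replicate (number_of_digits - (result.length : Int)).toNat 0

-- ===== PRECONDITION & SPEC =====
-- Pre_ excludes only negative digit sums that slip past A's guards (sum < 0 with
-- sum ≤ 9*n): there A still returns, but its value (a padded negative "digit", or [] for a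
-- nonpositive digit count) is an artefact of the fill loop, and B does the natural thing.
def Pre_find_largest_number (number_of_digits : Int) (sum_of_digits : Int) : Prop :=
  0 ≤ sum_of_digits ∨ 9 * number_of_digits < sum_of_digits
instance (number_of_digits : Int) (sum_of_digits : Int) : Decidable (Pre_find_largest_number number_of_digits sum_of_digits) := by unfold Pre_find_largest_number; infer_instance

def pvWitness_find_largest_number : Int × Int := (3, 20)

def Spec_find_largest_number (number_of_digits : Int) (sum_of_digits : Int) (out : List Int) : Prop := out = find_largest_number_alt number_of_digits sum_of_digits
instance (number_of_digits : Int) (sum_of_digits : Int) (out : List Int) : Decidable (Spec_find_largest_number number_of_digits sum_of_digits out) := by unfold Spec_find_largest_number; infer_instance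

-- ===== CLAIM (what is proved, stated in full; the proofs are below) =====
def Claim_equal_find_largest_number : Prop := ∀ (number_of_digits : Int) (sum_of_digits : Int), Dom_find_largest_number number_of_digits sum_of_digits → Pre_find_largest_number number_of_digits sum_of_digits → Spec_find_largest_number number_of_digits sum_of_digits (find_largest_number number_of_digits sum_of_digits)

-- ===== LEMMAS AND PROOFS =====

-- the list A's loop produces, as a structural recursion on the number of remaining cells
def pvLoopA : Nat → Int → List Int
  | 0, _ => []
  | m + 1, s => if s ≥ 9 then 9 :: pvLoopA m (s - 9) else s :: pvLoopA m 0

-- the list B builds in its else-branch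
def pvBuild (n s : Int) : List Int :=
  let q := PySem.Int.floordiv s 9
  let r := PySem.Int.mod s 9
  let result := List.replicate q.toNat (9 : Int)
  let result := if r > 0 then result ++ [r] else result
  result ++ List.replicate (n - (result.length : Int)).toNat 0

lemma take_set_succ : ∀ (l : List Int) (k : Nat) (v : Int), k < l.length →
    (l.set k v).take (k + 1) = l.take k ++ [v] := by
  intro l
  induction l with
  | nil => intro k v h; simp at h
  | cons a t ih =>
    intro k v h
    cases k with
    | zero => simp
    | succ k =>
      simp only [List.set_cons_succ, List.take_succ_cons, List.cons_append, List.cons.injEq,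
        true_and]
      exact ih k v (by simpa using h)

lemma foldA (m : Nat) : ∀ (j s : Int) (res : List Int), 0 ≤ j →
    res.length = j.toNat + m →
    ((PySem.List.pyRange j (j + (m : Int)) 1).foldl pvStepA (res, s)).1
      = res.take j.toNat ++ pvLoopA m s := by
  induction m with
  | zero =>
    intro j s res hj hlen
    rw [PySem.List.pyRange_one_eq_nil (by omega)]
    simp [pvLoopA, List.take_of_length_le (by omega : res.length ≤ j.toNat)]
  | succ m ih =>
    intro j s res hj hlen
    rw [PySem.List.pyRange_one_cons (by omega : j < j + ((m + 1 : Nat) : Int))]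
    rw [show j + ((m + 1 : Nat) : Int) = (j + 1) + (m : Int) by push_cast; ring]
    simp only [List.foldl_cons]
    have hjk : j.toNat < res.length := by omega
    have hnat : (j + 1).toNat = j.toNat + 1 := by omega
    by_cases h9 : s ≥ 9
    · have hstep : pvStepA (res, s) j = (res.set j.toNat 9, s - 9) := by
        simp [pvStepA, h9]
      rw [hstep, ih (j + 1) (s - 9) (res.set j.toNat 9) (by omega)
        (by simp [hnat]; omega)]
      rw [hnat, take_set_succ res j.toNat 9 hjk]
      simp [pvLoopA, h9]
    · have hstep : pvStepA (res, s) j = (res.set j.toNat s, 0) := by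
        simp [pvStepA, h9]
      rw [hstep, ih (j + 1) 0 (res.set j.toNat s) (by omega)
        (by simp [hnat]; omega)]
      rw [hnat, take_set_succ res j.toNat s hjk]
      simp [pvLoopA, h9]

lemma build_zero (n : Int) : pvBuild n 0 = List.replicate n.toNat 0 := by
  simp [pvBuild, PySem.Int.floordiv, PySem.Int.mod]

lemma build_step (n s : Int) (h9 : 9 ≤ s) :
    pvBuild (n + 1) s = 9 :: pvBuild n (s - 9) := by
  have h0 : (0 : Int) < 9 := by norm_num
  simp only [pvBuild, PySem.Int.floordiv_eq_ediv_of_pos h0, PySem.Int.mod_eq_emod_of_pos h0]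
  have hr : s % 9 = (s - 9) % 9 := by omega
  have hqt : (s / 9).toNat = ((s - 9) / 9).toNat + 1 := by omega
  rw [hr, hqt, List.replicate_succ]
  by_cases hrp : (s - 9) % 9 > 0
  · simp only [if_pos hrp, List.cons_append, List.length_cons, List.length_append,
      List.length_replicate, List.length_nil]
    congr 4
    omega
  · simp only [if_neg hrp, List.length_cons, List.length_replicate, List.cons_append]
    congr 3
    omega

lemma build_small (n s : Int) (hs0 : 0 < s) (hs9 : s < 9) :
    pvBuild (n + 1) s = s :: List.replicate n.toNat 0 := by
  have h0 : (0 : Int) < 9 := by norm_num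
  simp only [pvBuild, PySem.Int.floordiv_eq_ediv_of_pos h0, PySem.Int.mod_eq_emod_of_pos h0]
  have hq : s / 9 = 0 := by omega
  have hr : s % 9 = s := by omega
  rw [hq, hr]
  simp [hs0, show (n + 1 - 1 : Int) = n by ring]

lemma loop_eq (m : Nat) : ∀ s : Int, 0 ≤ s → s ≤ 9 * m →
    pvLoopA m s = pvBuild (m : Int) s := by
  induction m with
  | zero =>
    intro s h0 h9
    have : s = 0 := by omega
    subst this
    simp [pvLoopA, build_zero]
  | succ m ih =>
    intro s h0 h9
    by_cases hs9 : s ≥ 9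
    · rw [show ((m + 1 : Nat) : Int) = (m : Int) + 1 by push_cast; ring,
        build_step _ s hs9]
      simp only [pvLoopA, if_pos hs9]
      rw [ih (s - 9) (by omega) (by push_cast at h9 ⊢; omega)]
    · by_cases hs0 : s = 0
      · subst hs0
        rw [build_zero]
        simp only [pvLoopA, if_neg hs9]
        rw [ih 0 le_rfl (by positivity)]
        rw [build_zero]
        simp [List.replicate_succ]
      · rw [show ((m + 1 : Nat) : Int) = (m : Int) + 1 by push_cast; ring,
          build_small _ s (by omega) (by omega)]
        simp only [pvLoopA, if_neg hs9]
        rw [ih 0 le_rfl (by positivity), build_zero]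

-- ===== VERDICT (by name: the statement is the Claim_ definition above) =====
theorem find_largest_number_spec : Claim_equal_find_largest_number := by
  intro n s _ hpre
  unfold Spec_find_largest_number find_largest_number find_largest_number_alt
  by_cases h0 : s = 0
  · simp [h0]
  · simp only [if_neg h0]
    by_cases hbig : s > 9 * n
    · simp [hbig]
    · simp only [if_neg hbig]
      have hs : 0 ≤ s := by rcases hpre with h | h <;> omega
      have hn : 1 ≤ n := by omega
      have hcast : ((n.toNat : Int)) = n := Int.toNat_of_nonneg (by omega)
      have := foldA n.toNat 0 s (List.replicate n.toNat 0) le_rfl (by simp)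
      rw [show (0 : Int) + (n.toNat : Int) = n by omega] at this
      rw [this]
      simp only [Int.toNat_zero, List.take_zero, List.nil_append]
      rw [loop_eq n.toNat s hs (by omega), hcast]
      rfl
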